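-- pv_equiv track=rewrite | github.com/Sadalmalik/KnowledgeBase | knowledge/Algorythm.py | try_collapse_dicts
-- ===== SOURCE A (Python) =====
-- def try_collapse_dicts(dicts):
--     """Объединяет все словари в один при условии что у одинаковых ключей в разных словарях одинаковые значения"""
--     keys = set()
--     for d in dicts:
--         keys |= d.keys()
--     result = dict()
--     for d in dicts:
--         for k in keys:
--             if k not in d:
--                 continue
--             if k not in result:
--                 result[k] = d[k]
--                 continue
--             if result[k] != d[k]:
--                 return None
--     return result
-- ===== SOURCE B (Python) =====
-- def try_collapse_dicts(dicts):
--     """Объединяет все словари в один при условии что у одинаковых ключей в разных словарях одинаковые значения"""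
--     result = {}
--     for d in dicts:
--         for k, v in d.items():
--             if result.setdefault(k, v) != v:
--                 return None
--     return result
-- ===== Notes on version B (the rewrite author's own statement) =====
-- stated objective: faster
-- what changed: Instead of precomputing the union of all keys and scanning that full key set once per dict, B makes a single pass over each dict's own items using dict.setdefault, so work is proportional to the total number of entries rather than dicts x union-of-keys.
import Mathlib
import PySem

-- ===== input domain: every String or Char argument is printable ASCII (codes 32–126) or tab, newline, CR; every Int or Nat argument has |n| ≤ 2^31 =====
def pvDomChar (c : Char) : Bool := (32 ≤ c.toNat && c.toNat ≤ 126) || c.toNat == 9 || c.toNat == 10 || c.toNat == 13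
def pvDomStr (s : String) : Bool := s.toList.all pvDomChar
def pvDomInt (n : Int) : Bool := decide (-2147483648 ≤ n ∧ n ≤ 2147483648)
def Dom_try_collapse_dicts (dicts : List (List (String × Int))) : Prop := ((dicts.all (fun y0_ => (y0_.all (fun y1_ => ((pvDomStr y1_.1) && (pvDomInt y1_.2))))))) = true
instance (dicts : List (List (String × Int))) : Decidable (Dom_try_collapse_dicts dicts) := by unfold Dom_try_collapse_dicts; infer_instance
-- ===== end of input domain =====

-- B replaces A's scan of the full key union per dict by one pass over each dict's own
-- items (objective: faster, O(total entries) instead of O(dicts × union keys)).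
-- Python A iterates a hash-ordered set, so the insertion order of its result dict is
-- hash-dependent; dict outputs are compared ignoring order, and both ports record the
-- merged dict in first-insertion order.

-- ===== PORT A =====
-- body of A's inner 'for k in keys' loop (early 'return None' = absorbing none state)
def pvStepA (dd : PySem.Dict String Int) (acc : Option (PySem.Dict String Int)) (k : String) :
    Option (PySem.Dict String Int) :=
  match acc with
  | none => none
  | some result =>
    if dd.contains k = false then some result            -- if k not in d: continue
    else if result.contains k = false then
      some (result.insert k (dd.getD k 0))               -- result[k] = d[k] (k in d, so getD is exact)
    else if result.getD k 0 ≠ dd.getD k 0 then none      -- if result[k] != d[k]: return None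
    else some result

def try_collapse_dicts (dicts : List (List (String × Int))) : Option (List (String × Int)) :=
  -- keys = set(); for d in dicts: keys |= d.keys()
  let keys : PySem.Set String :=
    dicts.foldl (fun s d => PySem.Set.union s (PySem.Dict.ofList d).keys) PySem.Set.empty
  -- result = dict(); for d in dicts: for k in keys: …
  (dicts.foldl (fun acc d => keys.foldl (pvStepA (PySem.Dict.ofList d)) acc)
      (some PySem.Dict.empty)).map PySem.Dict.items

-- ===== PORT B =====
-- body of B's 'for k, v in d.items()' loop; Python's 'result.setdefault(k, v) != v'
-- compares the value setdefault returns, which is result.get(k, v) = result.getD k v.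
def pvStepB (acc : Option (PySem.Dict String Int)) (p : String × Int) :
    Option (PySem.Dict String Int) :=
  match acc with
  | none => none
  | some result =>
    if result.getD p.1 p.2 ≠ p.2 then none
    else some (result.setdefault p.1 p.2)

def try_collapse_dicts_alt (dicts : List (List (String × Int))) : Option (List (String × Int)) :=
  (dicts.foldl (fun acc d => (PySem.Dict.ofList d).items.foldl pvStepB acc)
      (some PySem.Dict.empty)).map PySem.Dict.items

-- ===== PRECONDITION & SPEC =====
def Spec_try_collapse_dicts (dicts : List (List (String × Int))) (out : Option (List (String × Int))) : Prop := out = try_collapse_dicts_alt dicts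
instance (dicts : List (List (String × Int))) (out : Option (List (String × Int))) : Decidable (Spec_try_collapse_dicts dicts out) := by unfold Spec_try_collapse_dicts; infer_instance

-- ===== CLAIM (what is proved, stated in full; the proofs are below) =====
def Claim_equal_try_collapse_dicts : Prop := ∀ (dicts : List (List (String × Int))), Dom_try_collapse_dicts dicts → Spec_try_collapse_dicts dicts (try_collapse_dicts dicts)

-- ===== LEMMAS AND PROOFS =====

-- the list of keys of all dicts, in order of appearance (with repetitions)
def pvFlat (dicts : List (List (String × Int))) : List String :=
  (dicts.map (fun d => (PySem.Dict.ofList d).keys)).flatten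

-- the pairs A's inner loop acts on, in key-scan order
def pvPairs (dd : PySem.Dict String Int) (ks : List String) : List (String × Int) :=
  ks.filterMap (fun k => if dd.contains k = true then some (k, dd.getD k 0) else none)

-- canonical result of one pass over pairs ps starting from result r
def pvPass (r : PySem.Dict String Int) (ps : List (String × Int)) :
    Option (PySem.Dict String Int) :=
  if ps.any (fun p => r.contains p.1 && r.getD p.1 p.2 != p.2) then none
  else some ⟨r.items ++ ps.filter (fun p => !r.contains p.1)⟩

theorem pvStepB_none (ps : List (String × Int)) : ps.foldl pvStepB none = none := by
  induction ps with
  | nil => rfl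
  | cons p ps ih => simpa [pvStepB] using ih

theorem pvStepA_none (dd : PySem.Dict String Int) (ks : List String) :
    ks.foldl (pvStepA dd) none = none := by
  induction ks with
  | nil => rfl
  | cons k ks ih => simpa [pvStepA] using ih

theorem pvStep_agree (dd r : PySem.Dict String Int) (k : String)
    (hc : dd.contains k = true) :
    pvStepA dd (some r) k = pvStepB (some r) (k, dd.getD k 0) := by
  by_cases hrk : r.contains k = true
  · obtain ⟨w, hw⟩ : ∃ w, r.get? k = some w := by
      cases h : r.get? k with
      | none => exact absurd hrk (by simp [(PySem.Dict.get?_eq_none_iff_contains r k).mp h])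
      | some w => exact ⟨w, rfl⟩
    have h1 : r.getD k 0 = w := PySem.Dict.getD_of_get?_eq_some r 0 hw
    have h2 : r.getD k (dd.getD k 0) = w := PySem.Dict.getD_of_get?_eq_some r _ hw
    simp only [pvStepA, pvStepB, hc, hrk, h1, h2, if_true,
      PySem.Dict.setdefault]
    by_cases hne : w = dd.getD k 0 <;> simp [hne]
  · have hrk' : r.contains k = false := by simpa using hrk
    have h1 : r.getD k (dd.getD k 0) = dd.getD k 0 := PySem.Dict.getD_of_not_contains r _ hrk'
    simp [pvStepA, pvStepB, hc, hrk', h1, PySem.Dict.setdefault, PySem.Dict.insert]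

-- A's inner loop is B's inner loop on the pairs pvPairs dd ks
theorem pvA_eq_B_pairs (dd : PySem.Dict String Int) (ks : List String)
    (acc : Option (PySem.Dict String Int)) :
    ks.foldl (pvStepA dd) acc = (pvPairs dd ks).foldl pvStepB acc := by
  induction ks generalizing acc with
  | nil => rfl
  | cons k ks ih =>
    by_cases hc : dd.contains k = true
    · cases acc with
      | none => simp [pvPairs, hc, pvStepA, pvStepB, pvStepA_none,
          pvStepB_none (ks.filterMap _)]
      | some r =>
        simp only [List.foldl_cons, pvPairs, List.filterMap_cons, hc, if_true]
        rw [pvStep_agree dd r k hc, ih]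
        rfl
    · have hc' : dd.contains k = false := by simpa using hc
      have : pvStepA dd acc k = acc := by cases acc <;> simp [pvStepA, hc']
      simp only [List.foldl_cons, this, pvPairs, List.filterMap_cons, hc']
      simpa [pvPairs] using ih acc

theorem pvMk_getD_of_ne (items : List (String × Int)) (q : String × Int) (k : String) (d0 : Int)
    (hne : k ≠ q.1) :
    (PySem.Dict.mk (items ++ [q])).getD k d0 = (PySem.Dict.mk items).getD k d0 := by
  simp only [PySem.Dict.getD, PySem.Dict.get?, List.find?_append]
  cases h : List.find? (fun p => p.1 == k) items with
  | some w => simp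
  | none =>
    have hb : (q.1 == k) = false := by simp [Ne.symm hne]
    simp [hb]

-- characterization of B's inner loop
theorem pvB_pass (ps : List (String × Int)) (r : PySem.Dict String Int)
    (hps : (ps.map Prod.fst).Nodup) :
    ps.foldl pvStepB (some r) = pvPass r ps := by
  induction ps generalizing r with
  | nil => simp [pvPass]
  | cons p ps ih =>
    have hps' : (ps.map Prod.fst).Nodup := (List.nodup_cons.mp (by simpa using hps)).2
    have hpn : p.1 ∉ ps.map Prod.fst := (List.nodup_cons.mp (by simpa using hps)).1
    by_cases hc : r.contains p.1 = true
    · obtain ⟨w, hw⟩ : ∃ w, r.get? p.1 = some w := by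
        cases h : r.get? p.1 with
        | none => exact absurd hc (by simp [(PySem.Dict.get?_eq_none_iff_contains r p.1).mp h])
        | some w => exact ⟨w, rfl⟩
      have h1 : r.getD p.1 p.2 = w := PySem.Dict.getD_of_get?_eq_some r _ hw
      by_cases hne : w = p.2
      · -- value agrees: state unchanged, drop p from both sides
        have hstep : pvStepB (some r) p = some r := by
          simp [pvStepB, h1, hne, PySem.Dict.setdefault, hc]
        rw [List.foldl_cons, hstep, ih r hps']
        simp only [pvPass, List.any_cons, List.filter_cons, h1, hne, bne_self_eq_false,
          Bool.and_false, Bool.false_or, hc, Bool.not_true, Bool.false_eq_true, if_false]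
      · have hstep : pvStepB (some r) p = none := by simp [pvStepB, h1, hne]
        rw [List.foldl_cons, hstep, pvStepB_none]
        have : (r.contains p.1 && r.getD p.1 p.2 != p.2) = true := by simp [hc, h1, hne]
        simp [pvPass, List.any_cons, this]
    · have hc' : r.contains p.1 = false := by simpa using hc
      have h1 : r.getD p.1 p.2 = p.2 := PySem.Dict.getD_of_not_contains r _ hc'
      have hstep : pvStepB (some r) p = some (PySem.Dict.mk (r.items ++ [p])) := by
        simp [pvStepB, h1, PySem.Dict.setdefault, hc']
      rw [List.foldl_cons, hstep, ih _ hps']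
      -- now compare pvPass of extended dict with pvPass r (p :: ps)
      have hcont : ∀ q ∈ ps, (PySem.Dict.mk (r.items ++ [p])).contains q.1 = r.contains q.1 := by
        intro q hq
        have : p.1 ≠ q.1 := fun h => hpn (h ▸ List.mem_map_of_mem hq)
        simp [PySem.Dict.contains, this]
      have hgd : ∀ q ∈ ps, (PySem.Dict.mk (r.items ++ [p])).getD q.1 q.2 = r.getD q.1 q.2 := by
        intro q hq
        have : p.1 ≠ q.1 := fun h => hpn (h ▸ List.mem_map_of_mem hq)
        exact pvMk_getD_of_ne _ _ _ _ (Ne.symm this)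
      have hany : (ps.any (fun q => (PySem.Dict.mk (r.items ++ [p])).contains q.1 &&
            (PySem.Dict.mk (r.items ++ [p])).getD q.1 q.2 != q.2))
          = (ps.any (fun q => r.contains q.1 && r.getD q.1 q.2 != q.2)) := by
        apply PySem.List.any_congr_mem
        intro q hq; rw [hcont q hq, hgd q hq]
      have hfil : ps.filter (fun q => !(PySem.Dict.mk (r.items ++ [p])).contains q.1)
          = ps.filter (fun q => !r.contains q.1) := by
        apply List.filter_congr; intro q hq; rw [hcont q hq]
      simp only [pvPass, hany, hfil, List.any_cons, hc', h1, List.filter_cons,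
        Bool.false_and, Bool.false_or]
      simp

-- ---- Set facts specific to these programs ----

theorem pvSet_add_filter (s : PySem.Set String) (x : String) (q : String → Bool) :
    (PySem.Set.add s x).filter q = if q x then PySem.Set.add (s.filter q) x else s.filter q := by
  by_cases hm : x ∈ s
  · have h1 : PySem.Set.add s x = s := by
      simp [PySem.Set.add, PySem.Set.contains, List.contains_eq_mem, hm]
    by_cases hq : q x = true
    · have hm' : x ∈ s.filter q := List.mem_filter.mpr ⟨hm, hq⟩
      have h2 : PySem.Set.add (s.filter q) x = s.filter q := by
        simp [PySem.Set.add, PySem.Set.contains, List.contains_eq_mem, hm']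
      simp [h1, h2, hq]
    · simp [h1, hq]
  · have h1 : PySem.Set.add s x = s ++ [x] := by
      simp [PySem.Set.add, PySem.Set.contains, List.contains_eq_mem, hm]
    by_cases hq : q x = true
    · have hm' : x ∉ s.filter q := fun h => hm (List.mem_filter.mp h).1
      have h2 : PySem.Set.add (s.filter q) x = s.filter q ++ [x] := by
        simp [PySem.Set.add, PySem.Set.contains, List.contains_eq_mem, hm']
      simp [h1, h2, hq, List.filter_append]
    · simp [h1, hq, List.filter_append]

theorem pvSet_foldl_filter (q : String → Bool) :
    ∀ (L : List String) (s : PySem.Set String),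
      (List.foldl PySem.Set.add s L).filter q
        = List.foldl PySem.Set.add (s.filter q) (L.filter q) := by
  intro L
  induction L with
  | nil => intro s; rfl
  | cons x L ih =>
    intro s
    by_cases hq : q x = true <;>
      simp [hq, ih, pvSet_add_filter, List.foldl_cons]

theorem pvSet_ofList_filter (L : List String) (q : String → Bool) :
    (PySem.Set.ofList L).filter q = PySem.Set.ofList (L.filter q) := by
  simpa [PySem.Set.ofList] using pvSet_foldl_filter q L []

theorem pvSet_foldl_add_fresh : ∀ (xs : List String) (s : PySem.Set String), xs.Nodup →
    (∀ x ∈ xs, PySem.Set.contains s x = false) → List.foldl PySem.Set.add s xs = s ++ xs := by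
  intro xs
  induction xs with
  | nil => intro s _ _; simp
  | cons x xs ih =>
    intro s hnd hfresh
    have hcm : x ∉ s := by
      simpa [PySem.Set.contains, List.contains_eq_mem] using hfresh x (by simp)
    have hstep : PySem.Set.add s x = s ++ [x] := by
      simp [PySem.Set.add, PySem.Set.contains, List.contains_eq_mem, hcm]
    have hfresh' : ∀ y ∈ xs, PySem.Set.contains (s ++ [x]) y = false := by
      intro y hy
      have hyx : y ≠ x := fun h => (List.nodup_cons.mp hnd).1 (h ▸ hy)
      have h0' : y ∉ s := by
        simpa [PySem.Set.contains, List.contains_eq_mem] using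
          hfresh y (List.mem_cons_of_mem _ hy)
      have hny : y ∉ s ++ [x] := by
        simp only [List.mem_append, List.mem_singleton]
        rintro (h | h)
        · exact h0' h
        · exact hyx h
      simpa [PySem.Set.contains, List.contains_eq_mem] using hny
    rw [List.foldl_cons, hstep, ih (s ++ [x]) (List.nodup_cons.mp hnd).2 hfresh']
    simp

theorem pvSet_ofList_nodup (xs : List String) (hnd : xs.Nodup) : PySem.Set.ofList xs = xs := by
  have := pvSet_foldl_add_fresh xs [] hnd (by intro x _; rfl)
  simpa [PySem.Set.ofList] using this

theorem pvSet_foldl_add_mem : ∀ (ys : List String) (s : PySem.Set String),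
    (∀ y ∈ ys, PySem.Set.contains s y = true) → List.foldl PySem.Set.add s ys = s := by
  intro ys
  induction ys with
  | nil => intro s _; rfl
  | cons y ys ih =>
    intro s hmem
    have hm : y ∈ s := by
      simpa [PySem.Set.contains, List.contains_eq_mem] using hmem y (by simp)
    have hstep : PySem.Set.add s y = s := by
      simp [PySem.Set.add, PySem.Set.contains, List.contains_eq_mem, hm]
    rw [List.foldl_cons, hstep, ih s (fun z hz => hmem z (List.mem_cons_of_mem _ hz))]

theorem pvSet_ofList_append_absorb (xs ys : List String) (hnd : xs.Nodup)
    (hsub : ∀ y ∈ ys, y ∈ xs) : PySem.Set.ofList (xs ++ ys) = xs := by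
  have h1 : PySem.Set.ofList (xs ++ ys) = List.foldl PySem.Set.add (PySem.Set.ofList xs) ys := by
    simp [PySem.Set.ofList, List.foldl_append]
  rw [h1, pvSet_ofList_nodup xs hnd]
  refine pvSet_foldl_add_mem ys xs (fun y hy => ?_)
  simpa [PySem.Set.contains, List.contains_eq_mem] using hsub y hy

-- ---- pvPairs facts ----

theorem pvPairs_filter (dd : PySem.Dict String Int) (ks : List String) (q : String → Bool) :
    (pvPairs dd ks).filter (fun p => q p.1) = pvPairs dd (ks.filter q) := by
  induction ks with
  | nil => rfl
  | cons k ks ih =>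
    by_cases hc : dd.contains k = true <;> by_cases hq : q k = true <;>
      simp [pvPairs, hc, hq] <;> simpa [pvPairs] using ih

theorem pvPairs_filter_contains (dd : PySem.Dict String Int) (ks : List String) :
    pvPairs dd (ks.filter (fun k => dd.contains k)) = pvPairs dd ks := by
  induction ks with
  | nil => rfl
  | cons k ks ih =>
    by_cases hc : dd.contains k = true <;> simp [pvPairs, hc] <;>
      simpa [pvPairs] using ih

theorem pvPairs_map_fst (dd : PySem.Dict String Int) (ks : List String) :
    (pvPairs dd ks).map Prod.fst = ks.filter (fun k => dd.contains k) := by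
  induction ks with
  | nil => rfl
  | cons k ks ih =>
    by_cases hc : dd.contains k = true <;> simp [pvPairs, hc] <;>
      simpa [pvPairs] using ih

theorem pvPairs_keys (dd : PySem.Dict String Int) (hnd : dd.keys.Nodup) :
    pvPairs dd dd.keys = dd.items := by
  have h1 : pvPairs dd dd.keys
      = dd.items.filterMap (fun p =>
          if dd.contains p.1 = true then some (p.1, dd.getD p.1 0) else none) := by
    simp [pvPairs, PySem.Dict.keys, List.filterMap_map, Function.comp]
  rw [h1, List.filterMap_congr (g := some) ?_, List.filterMap_some]
  intro p hp
  have hc : dd.contains p.1 = true := by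
    simp only [PySem.Dict.contains, List.any_eq_true]
    exact ⟨p, hp, by simp⟩
  have hv : dd.getD p.1 0 = p.2 := PySem.Dict.getD_of_mem_items dd hp hnd 0
  simp [hc, hv]

theorem pvMem_pairs (dd : PySem.Dict String Int) (ks : List String)
    (hnd : dd.keys.Nodup) (hsub : ∀ k ∈ dd.keys, k ∈ ks) (p : String × Int) :
    p ∈ pvPairs dd ks ↔ p ∈ dd.items := by
  constructor
  · intro hp
    rcases List.mem_filterMap.mp hp with ⟨k, hk, hsome⟩
    by_cases hc : dd.contains k = true
    · simp only [hc, if_true, Option.some.injEq] at hsome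
      obtain ⟨w, hw⟩ : ∃ w, dd.get? k = some w := by
        cases h : dd.get? k with
        | none => exact absurd hc (by simp [(PySem.Dict.get?_eq_none_iff_contains dd k).mp h])
        | some w => exact ⟨w, rfl⟩
      have : dd.getD k 0 = w := PySem.Dict.getD_of_get?_eq_some dd 0 hw
      rw [← hsome, this]
      exact PySem.Dict.mem_items_of_get?_eq_some dd hw
    · simp [hc] at hsome
  · intro hp
    have hk : p.1 ∈ dd.keys := by
      simpa [PySem.Dict.keys] using List.mem_map_of_mem (f := Prod.fst) hp
    refine List.mem_filterMap.mpr ⟨p.1, hsub p.1 hk, ?_⟩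
    have hc : dd.contains p.1 = true := by
      simp only [PySem.Dict.contains, List.any_eq_true]
      exact ⟨p, hp, by simp⟩
    have hv : dd.getD p.1 0 = p.2 := PySem.Dict.getD_of_mem_items dd hp hnd 0
    simp [hc, hv]

-- ---- one pass of A over the key union = one pass of B over d.items ----

theorem pvPass_eq (dd r : PySem.Dict String Int) (K : List String)
    (hndd : dd.keys.Nodup)
    (hsub : ∀ k ∈ dd.keys, k ∈ K)
    (hfil : K.filter (fun k => dd.contains k && !r.contains k)
        = dd.keys.filter (fun k => !r.contains k)) :
    pvPass r (pvPairs dd K) = pvPass r dd.items := by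
  have hany : ((pvPairs dd K).any fun p => r.contains p.1 && r.getD p.1 p.2 != p.2)
      = (dd.items.any fun p => r.contains p.1 && r.getD p.1 p.2 != p.2) := by
    cases h : dd.items.any fun p => r.contains p.1 && r.getD p.1 p.2 != p.2 with
    | true =>
      rcases List.any_eq_true.mp h with ⟨p, hp, hcond⟩
      exact List.any_eq_true.mpr ⟨p, (pvMem_pairs dd K hndd hsub p).mpr hp, hcond⟩
    | false =>
      refine List.any_eq_false.mpr ?_
      intro p hp
      exact List.any_eq_false.mp h p ((pvMem_pairs dd K hndd hsub p).mp hp)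
  have hfil' : (pvPairs dd K).filter (fun p => !r.contains p.1)
      = dd.items.filter (fun p => !r.contains p.1) := by
    rw [pvPairs_filter dd K (fun k => !r.contains k)]
    rw [← pvPairs_filter_contains dd (K.filter (fun k => !r.contains k))]
    rw [show (K.filter (fun k => !r.contains k)).filter (fun k => dd.contains k)
        = K.filter (fun k => dd.contains k && !r.contains k) from List.filter_filter]
    rw [hfil]
    rw [← pvPairs_keys dd hndd, pvPairs_filter dd dd.keys (fun k => !r.contains k)]
  unfold pvPass
  rw [hany, hfil']

theorem pvOuterA_none (K : PySem.Set String) (rest : List (List (String × Int))) :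
    rest.foldl (fun acc d => K.foldl (pvStepA (PySem.Dict.ofList d)) acc) none = none := by
  induction rest with
  | nil => rfl
  | cons d rest ih => simpa [pvStepA_none] using ih

theorem pvOuterB_none (rest : List (List (String × Int))) :
    rest.foldl (fun acc d => (PySem.Dict.ofList d).items.foldl pvStepB acc) none = none := by
  induction rest with
  | nil => rfl
  | cons d rest ih => simpa [pvStepB_none] using ih

theorem pv_main (rest : List (List (String × Int))) : ∀ (pre : List String)
    (r : PySem.Dict String Int) (K : PySem.Set String),
    K = PySem.Set.ofList (pre ++ pvFlat rest) →
    (∀ k, r.contains k = true ↔ k ∈ pre) →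
    r.keys.Nodup →
    rest.foldl (fun acc d => K.foldl (pvStepA (PySem.Dict.ofList d)) acc) (some r)
      = rest.foldl (fun acc d => (PySem.Dict.ofList d).items.foldl pvStepB acc) (some r) := by
  induction rest with
  | nil => intros; rfl
  | cons d rest ih =>
    intro pre r K hK hr hnd
    have hndd : (PySem.Dict.ofList d).keys.Nodup := PySem.Dict.nodup_keys_ofList d
    have hKnd : K.Nodup := by rw [hK]; exact PySem.Set.nodup_ofList _
    have hflat : pvFlat (d :: rest) = (PySem.Dict.ofList d).keys ++ pvFlat rest := by
      simp [pvFlat]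
    have hsub : ∀ k ∈ (PySem.Dict.ofList d).keys, k ∈ K := by
      intro k hk
      rw [hK]
      exact (PySem.Set.mem_ofList _ _).mpr (by simp [hflat, hk])
    have hfil : K.filter (fun k => (PySem.Dict.ofList d).contains k && !r.contains k)
        = (PySem.Dict.ofList d).keys.filter (fun k => !r.contains k) := by
      have h1 : K.filter (fun k => (PySem.Dict.ofList d).contains k && !r.contains k)
          = PySem.Set.ofList ((pre ++ ((PySem.Dict.ofList d).keys ++ pvFlat rest)).filter
              (fun k => (PySem.Dict.ofList d).contains k && !r.contains k)) := by
        rw [hK, hflat, pvSet_ofList_filter]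
      have hpre : pre.filter (fun k => (PySem.Dict.ofList d).contains k && !r.contains k)
          = [] := by
        refine List.filter_eq_nil_iff.mpr ?_
        intro k hk
        simp [(hr k).mpr hk]
      have hkeysfil : (PySem.Dict.ofList d).keys.filter
            (fun k => (PySem.Dict.ofList d).contains k && !r.contains k)
          = (PySem.Dict.ofList d).keys.filter (fun k => !r.contains k) := by
        refine List.filter_congr ?_
        intro k hk
        simp [(PySem.Dict.contains_iff_mem_keys _ k).mpr hk]
      have habs : ∀ y ∈ (pvFlat rest).filter
            (fun k => (PySem.Dict.ofList d).contains k && !r.contains k),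
          y ∈ (PySem.Dict.ofList d).keys.filter (fun k => !r.contains k) := by
        intro y hy
        rcases List.mem_filter.mp hy with ⟨_, hcond⟩
        rcases (Bool.and_eq_true _ _).mp hcond with ⟨hcd, hrc⟩
        exact List.mem_filter.mpr ⟨(PySem.Dict.contains_iff_mem_keys _ y).mp hcd, hrc⟩
      rw [h1, List.filter_append, List.filter_append, hpre, hkeysfil, List.nil_append]
      exact pvSet_ofList_append_absorb _ _ (hndd.filter _) habs
    have hpass : K.foldl (pvStepA (PySem.Dict.ofList d)) (some r)
        = (PySem.Dict.ofList d).items.foldl pvStepB (some r) := by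
      rw [pvA_eq_B_pairs, pvB_pass _ _ (by rw [pvPairs_map_fst]; exact hKnd.filter _),
        pvB_pass _ _ (by simpa [PySem.Dict.keys] using hndd)]
      exact pvPass_eq _ r K hndd hsub hfil
    rw [List.foldl_cons, List.foldl_cons, hpass]
    cases hres : (PySem.Dict.ofList d).items.foldl pvStepB (some r) with
    | none => rw [pvOuterA_none, pvOuterB_none]
    | some r' =>
      -- identify the state after the pass
      have hres' := hres
      rw [pvB_pass _ _ (by simpa [PySem.Dict.keys] using hndd)] at hres'
      unfold pvPass at hres'
      by_cases hany : ((PySem.Dict.ofList d).items.any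
          fun p => r.contains p.1 && r.getD p.1 p.2 != p.2) = true
      · rw [if_pos hany] at hres'; cases hres'
      · rw [if_neg hany] at hres'
        have hr'eq : r' = PySem.Dict.mk (r.items
            ++ (PySem.Dict.ofList d).items.filter (fun p => !r.contains p.1)) :=
          (Option.some.inj hres').symm
        have hkeys' : r'.keys = r.keys
            ++ (PySem.Dict.ofList d).keys.filter (fun k => !r.contains k) := by
          rw [hr'eq]
          show (r.items ++ _).map _ = _
          rw [List.map_append]
          congr 1
          show ((PySem.Dict.ofList d).items.filter
              (fun p => !r.contains p.1)).map (fun x => x.1)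
            = ((PySem.Dict.ofList d).items.map (fun x => x.1)).filter
              (fun k => !r.contains k)
          rw [List.filter_map]
          rfl
        have hr2 : ∀ k, r'.contains k = true ↔ k ∈ pre ++ (PySem.Dict.ofList d).keys := by
          intro k
          rw [PySem.Dict.contains_iff_mem_keys, hkeys']
          constructor
          · intro hk
            rcases List.mem_append.mp hk with hk | hk
            · exact List.mem_append.mpr (Or.inl ((hr k).mp
                ((PySem.Dict.contains_iff_mem_keys r k).mpr hk)))
            · exact List.mem_append.mpr (Or.inr (List.mem_filter.mp hk).1)
          · intro hk
            rcases List.mem_append.mp hk with hk | hk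
            · exact List.mem_append.mpr (Or.inl
                ((PySem.Dict.contains_iff_mem_keys r k).mp ((hr k).mpr hk)))
            · by_cases hrc : r.contains k = true
              · exact List.mem_append.mpr (Or.inl
                  ((PySem.Dict.contains_iff_mem_keys r k).mp hrc))
              · exact List.mem_append.mpr (Or.inr (List.mem_filter.mpr
                  ⟨hk, by simpa using hrc⟩))
        have hnd2 : r'.keys.Nodup := by
          rw [hkeys']
          refine List.Nodup.append hnd (hndd.filter _) ?_
          intro k hk1 hk2
          have := (List.mem_filter.mp hk2).2
          rw [Bool.not_eq_eq_eq_not, Bool.not_true] at this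
          exact absurd ((PySem.Dict.contains_iff_mem_keys r k).mpr hk1)
            (by simp [this])
        have hK' : K = PySem.Set.ofList ((pre ++ (PySem.Dict.ofList d).keys)
            ++ pvFlat rest) := by
          rw [hK, hflat, List.append_assoc]
        exact ih (pre ++ (PySem.Dict.ofList d).keys) r' K hK' hr2 hnd2

-- ===== VERDICT (by name: the statement is the Claim_ definition above) =====
theorem try_collapse_dicts_spec : Claim_equal_try_collapse_dicts := by
  unfold Claim_equal_try_collapse_dicts Spec_try_collapse_dicts
  intro dicts _
  unfold try_collapse_dicts try_collapse_dicts_alt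
  have hkeys : dicts.foldl
        (fun s d => PySem.Set.union s (PySem.Dict.ofList d).keys) PySem.Set.empty
      = PySem.Set.ofList (pvFlat dicts) := by
    simp only [PySem.Set.union, PySem.Set.update, PySem.Set.ofList, pvFlat,
      List.foldl_flatten, List.foldl_map]
  simp only []
  rw [hkeys]
  have := pv_main dicts [] PySem.Dict.empty (PySem.Set.ofList (pvFlat dicts))
    (by rw [List.nil_append]) (by intro k; simp [PySem.Dict.contains_empty])
    (by simp [PySem.Dict.keys_empty])
  rw [this]
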